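-- pv_equiv track=rewrite | github.com/Flirm/quantum-circuits-implementation | implementations/windowed_arithmetic/table_lookup.py | transform_to_permutation
-- ===== SOURCE A (Python) =====
-- def transform_to_permutation(orig_list: list[int], n_bits: int) -> list[int]:
--     """ get unique permutation of elements from original list
--     retulting list is a permutation where the last n_bits from each element represent the original value
--     and the first bits are used to ensure uniqueness of the permutation.
--     The first bits can also be represented as the i-th appearance of that number.
--     """
--     new_list = []
--     appearance = {key: 0 for key in orig_list}
--     for i in orig_list:
--         appearance[i] += 1
--         if appearance[i] <= 1:
--             new_list.append(i)
--         else: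
--             new_number = i + (1 << n_bits) * (appearance[i] - 1)
--             new_list.append(new_number)
--     return new_list
-- ===== SOURCE B (Python) =====
-- def transform_to_permutation(orig_list: list[int], n_bits: int) -> list[int]:
--     """Group-and-scatter: first build value -> list of positions, then write each
--     occurrence's encoded value directly into its slot of a preallocated output."""
--     groups = {}
--     for idx, x in enumerate(orig_list):
--         groups.setdefault(x, []).append(idx)
--     out = [0] * len(orig_list)
--     for x, idxs in groups.items():
--         for k, idx in enumerate(idxs):
--             out[idx] = x if k == 0 else x + (1 << n_bits) * k
--     return out
-- ===== Notes on version B (the rewrite author's own statement) =====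
-- stated objective: alternative
-- what changed: Replaced A's single in-order counting pass (dict counter, append encoded value per step) with a two-stage group-and-scatter: first group positions by value, then for each value write each occurrence's encoded value into its slot of a preallocated output list.
import Mathlib
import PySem

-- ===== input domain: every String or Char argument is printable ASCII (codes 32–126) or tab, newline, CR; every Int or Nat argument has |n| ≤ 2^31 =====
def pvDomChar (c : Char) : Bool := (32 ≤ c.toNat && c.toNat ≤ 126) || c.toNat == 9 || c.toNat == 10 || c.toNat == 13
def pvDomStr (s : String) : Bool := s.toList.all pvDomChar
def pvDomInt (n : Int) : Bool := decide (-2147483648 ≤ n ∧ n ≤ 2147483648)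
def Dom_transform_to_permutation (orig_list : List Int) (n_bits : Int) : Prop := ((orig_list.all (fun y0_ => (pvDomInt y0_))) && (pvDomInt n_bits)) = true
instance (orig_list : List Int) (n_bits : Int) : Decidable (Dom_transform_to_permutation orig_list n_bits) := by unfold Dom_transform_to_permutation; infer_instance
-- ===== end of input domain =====

-- B replaces A's in-order counting pass with a group-positions-by-value then scatter-into-slots pass (alternative algorithm, not faster).

-- ===== PORT A =====
-- the loop: appearance[i] += 1; branch on the updated count; append to new_list
def pvALoop (n_bits : Int) : List Int → PySem.Dict Int Int → List Int → List Int
  | [], _, out => out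
  | x :: xs, d, out =>
    let d' := d.modify x 0 (· + 1)          -- appearance[i] += 1 (key always present: dict seeded with all keys)
    let c := d'.getD x 0
    if c ≤ 1 then pvALoop n_bits xs d' (out ++ [x])
    else pvALoop n_bits xs d' (out ++ [x + ((1 <<< n_bits.toNat : Nat) : Int) * (c - 1)])

def transform_to_permutation (orig_list : List Int) (n_bits : Int) : List Int :=
  pvALoop n_bits orig_list (orig_list.foldl (fun d k => d.insert k 0) PySem.Dict.empty) []

-- ===== PORT B =====
-- 'for idx, x in enumerate(orig_list): groups.setdefault(x, []).append(idx)'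
def pvBGroupsGo : Nat → List Int → PySem.Dict Int (List Nat) → PySem.Dict Int (List Nat)
  | _, [], d => d
  | i, x :: xs, d => pvBGroupsGo (i + 1) xs (d.modify x [] (· ++ [i]))

-- inner loop 'for k, idx in enumerate(idxs): out[idx] = x if k == 0 else x + (1 << n_bits) * k'
def pvBWrite (n_bits : Int) (x : Int) : Nat → List Nat → List Int → List Int
  | _, [], out => out
  | k, idx :: idxs, out =>
      pvBWrite n_bits x (k + 1) idxs
        (out.set idx (if k = 0 then x else x + ((1 <<< n_bits.toNat : Nat) : Int) * (k : Int)))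

-- outer loop 'for x, idxs in groups.items()'
def pvBScatter (n_bits : Int) : List (Int × List Nat) → List Int → List Int
  | [], out => out
  | (x, idxs) :: rest, out => pvBScatter n_bits rest (pvBWrite n_bits x 0 idxs out)

def transform_to_permutation_alt (orig_list : List Int) (n_bits : Int) : List Int :=
  pvBScatter n_bits (pvBGroupsGo 0 orig_list PySem.Dict.empty).items
    (List.replicate orig_list.length 0)

-- ===== PRECONDITION & SPEC =====
-- Pre_ excludes exactly the inputs where Python A raises (ValueError: negative shift
-- count, reached only when a duplicate forces 1 << n_bits with n_bits < 0).
def Pre_transform_to_permutation (orig_list : List Int) (n_bits : Int) : Prop :=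
  0 ≤ n_bits ∨ orig_list.Nodup
instance (orig_list : List Int) (n_bits : Int) : Decidable (Pre_transform_to_permutation orig_list n_bits) := by unfold Pre_transform_to_permutation; infer_instance

def pvWitness_transform_to_permutation : List Int × Int := ([3, 1, 3, 3], 4)

def Spec_transform_to_permutation (orig_list : List Int) (n_bits : Int) (out : List Int) : Prop := out = transform_to_permutation_alt orig_list n_bits
instance (orig_list : List Int) (n_bits : Int) (out : List Int) : Decidable (Spec_transform_to_permutation orig_list n_bits out) := by unfold Spec_transform_to_permutation; infer_instance

-- ===== CLAIM (what is proved, stated in full; the proofs are below) =====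
def Claim_equal_transform_to_permutation : Prop := ∀ (orig_list : List Int) (n_bits : Int), Dom_transform_to_permutation orig_list n_bits → Pre_transform_to_permutation orig_list n_bits → Spec_transform_to_permutation orig_list n_bits (transform_to_permutation orig_list n_bits)

-- ===== LEMMAS AND PROOFS =====

-- the common reference value: the k-th appearance of x is encoded as x + (1<<n_bits)*k
def pvEnc (n_bits x : Int) (k : Nat) : Int :=
  if k = 0 then x else x + ((1 <<< n_bits.toNat : Nat) : Int) * (k : Int)

-- reference list: element-wise pvEnc with k = occurrences in the prefix so far
def pvSpecGo (n_bits : Int) : List Int → List Int → List Int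
  | _, [] => []
  | pref, x :: xs => pvEnc n_bits x (pref.count x) :: pvSpecGo n_bits (pref ++ [x]) xs

-- the seeded dict {key: 0 for key in orig_list} answers 0 everywhere
lemma pvSeed_getD (l : List Int) :
    ∀ d : PySem.Dict Int Int, (∀ x, d.getD x 0 = 0) →
      ∀ x, (l.foldl (fun d k => d.insert k 0) d).getD x 0 = 0 := by
  induction l with
  | nil => intro d h x; simpa using h x
  | cons a t ih =>
    intro d h x
    simp only [List.foldl_cons]
    exact ih _ (fun y => by rw [PySem.Dict.getD_insert]; split <;> simp [h]) x

-- A's loop computes the reference list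
lemma pvALoop_eq (n_bits : Int) :
    ∀ (rest pref : List Int) (d : PySem.Dict Int Int) (out : List Int),
      (∀ x, d.getD x 0 = (pref.count x : Int)) →
      pvALoop n_bits rest d out = out ++ pvSpecGo n_bits pref rest := by
  intro rest
  induction rest with
  | nil => intro pref d out _; simp [pvALoop, pvSpecGo]
  | cons x xs ih =>
    intro pref d out hinv
    have hc : (d.modify x 0 (· + 1)).getD x 0 = (pref.count x : Int) + 1 := by
      rw [PySem.Dict.getD_modify_self, hinv]
    have hinv' : ∀ y, (d.modify x 0 (· + 1)).getD y 0 = (((pref ++ [x]).count y : Nat) : Int) := by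
      intro y
      rw [PySem.Dict.getD_modify]
      by_cases hy : y = x
      · rw [if_pos hy, hinv, hy]; simp [List.count_append]
      · have hxy : x ≠ y := fun h => hy h.symm
        rw [if_neg hy, hinv]
        simp [List.count_append, hxy]
    have hrec := fun out' => ih (pref ++ [x]) (d.modify x 0 (· + 1)) out' hinv'
    simp only [pvALoop, hc, pvSpecGo, pvEnc]
    by_cases h0 : pref.count x = 0
    · have hle : (pref.count x : Int) + 1 ≤ 1 := by omega
      rw [if_pos hle, hrec, if_pos h0]
      simp
    · have hle : ¬ ((pref.count x : Int) + 1 ≤ 1) := by omega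
      rw [if_neg hle, hrec, if_neg h0]
      have : (pref.count x : Int) + 1 - 1 = (pref.count x : Int) := by ring
      rw [this]
      simp

-- reference list, one element appended
lemma pvSpecGo_snoc (n_bits : Int) :
    ∀ (l pref : List Int) (a : Int),
      pvSpecGo n_bits pref (l ++ [a]) = pvSpecGo n_bits pref l ++ [pvEnc n_bits a ((pref ++ l).count a)] := by
  intro l
  induction l with
  | nil => intro pref a; simp [pvSpecGo]
  | cons x xs ih =>
    intro pref a
    simp only [List.cons_append, pvSpecGo, ih (pref ++ [x]) a, List.append_assoc]
    rfl

lemma pvBWrite_length (n_bits x : Int) :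
    ∀ (is : List Nat) (k : Nat) (out : List Int), (pvBWrite n_bits x k is out).length = out.length := by
  intro is
  induction is with
  | nil => intro k out; rfl
  | cons i t ih => intro k out; simp [pvBWrite, ih]

-- writes below the last slot commute with appending that slot
lemma pvBWrite_append_high (n_bits x : Int) :
    ∀ (is : List Nat) (k : Nat) (out : List Int) (v : Int),
      (∀ i ∈ is, i < out.length) →
      pvBWrite n_bits x k is (out ++ [v]) = pvBWrite n_bits x k is out ++ [v] := by
  intro is
  induction is with
  | nil => intro k out v _; rfl
  | cons i t ih =>
    intro k out v h
    have hi : i < out.length := h i (by simp)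
    simp only [pvBWrite]
    rw [List.set_append_left _ _ hi, ih]
    intro j hj
    rw [List.length_set]
    exact h j (by simp [hj])

lemma pvBScatter_append_high (n_bits : Int) :
    ∀ (ps : List (Int × List Nat)) (out : List Int) (v : Int),
      (∀ p ∈ ps, ∀ i ∈ p.2, i < out.length) →
      pvBScatter n_bits ps (out ++ [v]) = pvBScatter n_bits ps out ++ [v] := by
  intro ps
  induction ps with
  | nil => intro out v _; rfl
  | cons p t ih =>
    intro out v h
    obtain ⟨x, idxs⟩ := p
    simp only [pvBScatter]
    rw [pvBWrite_append_high _ _ _ _ _ _ (fun i hi => h (x, idxs) (by simp) i hi), ih]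
    intro q hq i hi
    rw [pvBWrite_length]
    exact h q (by simp [hq]) i hi

lemma pvBWrite_snoc (n_bits x : Int) :
    ∀ (is : List Nat) (k : Nat) (m : Nat) (out : List Int),
      pvBWrite n_bits x k (is ++ [m]) out
        = (pvBWrite n_bits x k is out).set m (pvEnc n_bits x (k + is.length)) := by
  intro is
  induction is with
  | nil => intro k m out; simp [pvBWrite, pvEnc]
  | cons i t ih =>
    intro k m out
    simp only [List.cons_append, pvBWrite, ih]
    congr 2
    simp only [List.length_cons]
    omega

lemma pvSet_last (l : List Int) (v w : Int) : (l ++ [v]).set l.length w = l ++ [w] := by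
  induction l with
  | nil => rfl
  | cons a t ih => simp [ih]

-- scatter with one group's index list extended by the fresh last slot
lemma pvScatter_hit (n_bits a : Int) :
    ∀ (l1 : List (Int × List Nat)) (is : List Nat) (l2 : List (Int × List Nat)) (out : List Int),
      (∀ p ∈ l1, ∀ i ∈ p.2, i < out.length) →
      (∀ i ∈ is, i < out.length) →
      (∀ p ∈ l2, ∀ i ∈ p.2, i < out.length) →
      pvBScatter n_bits (l1 ++ (a, is ++ [out.length]) :: l2) (out ++ [(0 : Int)])
        = pvBScatter n_bits (l1 ++ (a, is) :: l2) out ++ [pvEnc n_bits a is.length] := by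
  intro l1
  induction l1 with
  | nil =>
    intro is l2 out _ his hl2
    simp only [List.nil_append, pvBScatter]
    rw [pvBWrite_snoc, pvBWrite_append_high _ _ _ _ _ _ his]
    have hlen : (pvBWrite n_bits a 0 is out).length = out.length := pvBWrite_length _ _ _ _ _
    rw [← hlen, pvSet_last, pvBScatter_append_high]
    · simp
    · intro q hq i hi
      rw [hlen]
      exact hl2 q hq i hi
  | cons p t ih =>
    intro is l2 out hl1 his hl2
    obtain ⟨y, ys⟩ := p
    have hys : ∀ i ∈ ys, i < out.length := fun i hi => hl1 (y, ys) (by simp) i hi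
    have hlen : (pvBWrite n_bits y 0 ys out).length = out.length := pvBWrite_length _ _ _ _ _
    simp only [List.cons_append, pvBScatter]
    rw [pvBWrite_append_high _ _ _ _ _ _ hys, ← hlen]
    rw [ih is l2 (pvBWrite n_bits y 0 ys out)
      (fun q hq i hi => by rw [hlen]; exact hl1 q (by simp [hq]) i hi)
      (fun i hi => by rw [hlen]; exact his i hi)
      (fun q hq i hi => by rw [hlen]; exact hl2 q hq i hi)]

-- scatter with a brand-new singleton group at the end
lemma pvScatter_fresh (n_bits a : Int) :
    ∀ (ps : List (Int × List Nat)) (out : List Int),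
      (∀ p ∈ ps, ∀ i ∈ p.2, i < out.length) →
      pvBScatter n_bits (ps ++ [(a, [out.length])]) (out ++ [(0 : Int)])
        = pvBScatter n_bits ps out ++ [a] := by
  intro ps
  induction ps with
  | nil =>
    intro out _
    simp only [List.nil_append, pvBScatter, pvBWrite, if_true]
    simp
  | cons p t ih =>
    intro out h
    obtain ⟨y, ys⟩ := p
    have hys : ∀ i ∈ ys, i < out.length := fun i hi => h (y, ys) (by simp) i hi
    have hlen : (pvBWrite n_bits y 0 ys out).length = out.length := pvBWrite_length _ _ _ _ _
    simp only [List.cons_append, pvBScatter]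
    rw [pvBWrite_append_high _ _ _ _ _ _ hys, ← hlen]
    exact ih _ (fun q hq i hi => by rw [hlen]; exact h q (by simp [hq]) i hi)

lemma pvBGroupsGo_snoc :
    ∀ (l : List Int) (i : Nat) (d : PySem.Dict Int (List Nat)) (a : Int),
      pvBGroupsGo i (l ++ [a]) d = (pvBGroupsGo i l d).modify a [] (· ++ [i + l.length]) := by
  intro l
  induction l with
  | nil => intro i d a; simp [pvBGroupsGo]
  | cons x xs ih =>
    intro i d a
    simp only [List.cons_append, pvBGroupsGo, ih]
    have : i + 1 + xs.length = i + (x :: xs).length := by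
      simp only [List.length_cons]; omega
    rw [this]

lemma pvBGroupsGo_getD_len :
    ∀ (l : List Int) (i : Nat) (d : PySem.Dict Int (List Nat)) (c : Int),
      ((pvBGroupsGo i l d).getD c []).length = (d.getD c []).length + l.count c := by
  intro l
  induction l with
  | nil => intro i d c; simp [pvBGroupsGo]
  | cons x xs ih =>
    intro i d c
    simp only [pvBGroupsGo, ih]
    rw [PySem.Dict.getD_modify]
    by_cases hc : c = x
    · subst hc
      rw [if_pos rfl]
      simp [List.length_append]
      omega
    · rw [if_neg hc]
      have hne : (x == c) = false := beq_eq_false_iff_ne.mpr (fun h => hc h.symm)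
      simp [List.count_cons, hne]

lemma pvBGroupsGo_nodup :
    ∀ (l : List Int) (i : Nat) (d : PySem.Dict Int (List Nat)),
      d.keys.Nodup → (pvBGroupsGo i l d).keys.Nodup := by
  intro l
  induction l with
  | nil => intro i d h; exact h
  | cons x xs ih =>
    intro i d h
    exact ih _ _ (PySem.Dict.nodup_keys_insert _ _ _ h)

lemma pvBGroupsGo_bounds :
    ∀ (l : List Int) (i : Nat) (d : PySem.Dict Int (List Nat)) (n : Nat),
      (∀ p ∈ d.items, ∀ j ∈ p.2, j < n) → i + l.length ≤ n →
      ∀ p ∈ (pvBGroupsGo i l d).items, ∀ j ∈ p.2, j < n := by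
  intro l
  induction l with
  | nil => intro i d n h _; exact h
  | cons x xs ih =>
    intro i d n h hle
    simp only [List.length_cons] at hle
    apply ih (i + 1) _ n _ (by omega)
    intro p hp j hj
    rcases (PySem.Dict.mem_items_insert _ _ _ _).mp hp with heq | ⟨hmem, _⟩
    · subst heq
      rcases List.mem_append.mp hj with hj' | hj'
      · -- j in d.getD x []
        rw [PySem.Dict.getD_eq_get?_getD] at hj'
        cases hg : d.get? x with
        | none => rw [hg] at hj'; simp at hj'
        | some v =>
          rw [hg] at hj'
          exact h (x, v) (PySem.Dict.mem_items_of_get?_eq_some _ hg) j hj'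
      · simp at hj'
        omega
    · exact h p hmem j hj

-- B on orig ++ [a]: the new index orig.length lands in a's group with rank orig.count a
lemma pvAlt_snoc (n_bits : Int) (orig : List Int) (a : Int) :
    transform_to_permutation_alt (orig ++ [a]) n_bits
      = transform_to_permutation_alt orig n_bits ++ [pvEnc n_bits a (orig.count a)] := by
  unfold transform_to_permutation_alt
  set d := pvBGroupsGo 0 orig PySem.Dict.empty with hd
  set n := orig.length with hn
  have hG : pvBGroupsGo 0 (orig ++ [a]) PySem.Dict.empty
      = d.insert a (d.getD a [] ++ [n]) := by
    rw [pvBGroupsGo_snoc]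
    simp only [Nat.zero_add]
    rfl
  have hnodup : d.keys.Nodup := pvBGroupsGo_nodup orig 0 _ (by simp)
  have hbounds : ∀ p ∈ d.items, ∀ j ∈ p.2, j < n :=
    pvBGroupsGo_bounds orig 0 PySem.Dict.empty n
      (by intro p hp; rw [show (PySem.Dict.empty : PySem.Dict Int (List Nat)).items = [] from rfl] at hp; simp at hp)
      (by omega)
  have hlen : (d.getD a []).length = orig.count a := by
    rw [hd, pvBGroupsGo_getD_len]; simp
  have hrep : List.replicate (orig ++ [a]).length (0 : Int)
      = List.replicate n (0 : Int) ++ [0] := by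
    rw [hn]
    simp [List.replicate_succ']
  have hreplen : (List.replicate n (0 : Int)).length = n := List.length_replicate
  rw [hG, hrep]
  by_cases hc : d.contains a
  · -- a already has a group: its positions list gains index n at the same spot
    obtain ⟨is, hg⟩ : ∃ is, d.get? a = some is := by
      have := PySem.Dict.contains_eq_isSome_get? d a
      rw [hc] at this
      exact Option.isSome_iff_exists.mp this.symm
    have hgd : d.getD a [] = is := PySem.Dict.getD_of_get?_eq_some d [] hg
    have hmem : (a, is) ∈ d.items := PySem.Dict.mem_items_of_get?_eq_some d hg
    obtain ⟨l1, l2, hsplit⟩ := List.append_of_mem hmem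
    have hkeys : ((l1 ++ (a, is) :: l2).map Prod.fst).Nodup := by
      have : d.keys = d.items.map Prod.fst := rfl
      rw [this, hsplit] at hnodup
      exact hnodup
    rw [List.map_append, List.map_cons] at hkeys
    have hna1 : ∀ p ∈ l1, p.1 ≠ a := by
      intro p hp heq
      have hmem : a ∈ l1.map Prod.fst := by
        rw [← heq]; exact List.mem_map_of_mem hp
      exact (List.disjoint_of_nodup_append hkeys) hmem (by simp)
    have hna2 : ∀ p ∈ l2, p.1 ≠ a := by
      intro p hp heq
      have h2 : ((a, is).1 :: l2.map Prod.fst).Nodup := (List.nodup_append.mp hkeys).2.1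
      have hmem : a ∈ l2.map Prod.fst := by
        rw [← heq]; exact List.mem_map_of_mem hp
      exact (List.nodup_cons.mp h2).1 hmem
    have hitems : (d.insert a (d.getD a [] ++ [n])).items
        = l1 ++ (a, is ++ [n]) :: l2 := by
      rw [PySem.Dict.items_insert_of_contains _ _ hc, hsplit, hgd]
      rw [List.map_append, List.map_cons]
      congr 1
      · apply List.map_congr_left ?_ |>.trans (List.map_id _)
        intro p hp
        have : ¬ (p.1 == a) = true := by simpa using hna1 p hp
        simp [this]
      · congr 1
        · simp
        · apply List.map_congr_left ?_ |>.trans (List.map_id _)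
          intro p hp
          have : ¬ (p.1 == a) = true := by simpa using hna2 p hp
          simp [this]
    rw [hitems]
    have hb1 : ∀ p ∈ l1, ∀ i ∈ p.2, i < (List.replicate n (0 : Int)).length := by
      intro p hp i hi
      rw [hreplen]
      exact hbounds p (by rw [hsplit]; simp [hp]) i hi
    have hbis : ∀ i ∈ is, i < (List.replicate n (0 : Int)).length := by
      intro i hi
      rw [hreplen]
      exact hbounds (a, is) hmem i hi
    have hb2 : ∀ p ∈ l2, ∀ i ∈ p.2, i < (List.replicate n (0 : Int)).length := by
      intro p hp i hi
      rw [hreplen]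
      exact hbounds p (by rw [hsplit]; simp [hp]) i hi
    have := pvScatter_hit n_bits a l1 is l2 (List.replicate n (0 : Int)) hb1 hbis hb2
    rw [hreplen] at this
    rw [this, hsplit]
    have : is.length = orig.count a := by rw [← hgd]; exact hlen
    rw [this]
  · -- a is a fresh key: its singleton group is appended at the end
    have hc' : d.contains a = false := by simpa using hc
    have hgd : d.getD a [] = [] := PySem.Dict.getD_of_not_contains d [] hc'
    have hitems : (d.insert a (d.getD a [] ++ [n])).items = d.items ++ [(a, [n])] := by
      rw [PySem.Dict.items_insert_of_not_contains _ _ hc', hgd]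
      simp
    have hcount : orig.count a = 0 := by
      rw [← hlen, hgd]
      rfl
    rw [hitems, hcount]
    have hb : ∀ p ∈ d.items, ∀ i ∈ p.2, i < (List.replicate n (0 : Int)).length := by
      intro p hp i hi
      rw [hreplen]
      exact hbounds p hp i hi
    have := pvScatter_fresh n_bits a d.items (List.replicate n (0 : Int)) hb
    rw [hreplen] at this
    rw [this]
    rfl

lemma pvAlt_eq_spec (n_bits : Int) (l : List Int) :
    transform_to_permutation_alt l n_bits = pvSpecGo n_bits [] l := by
  induction l using List.reverseRecOn with
  | nil => rfl
  | append_singleton t a ih =>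
    rw [pvAlt_snoc, ih, pvSpecGo_snoc]
    simp

-- ===== VERDICT (by name: the statement is the Claim_ definition above) =====
theorem transform_to_permutation_spec : Claim_equal_transform_to_permutation := by
  intro orig_list n_bits _ _
  unfold Spec_transform_to_permutation transform_to_permutation
  have h0 := pvSeed_getD orig_list PySem.Dict.empty (fun x => by simp [PySem.Dict.getD_empty])
  rw [pvALoop_eq n_bits orig_list [] _ [] (fun x => by rw [h0 x]; simp), pvAlt_eq_spec]
  simp
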